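-- pv_equiv track=rewrite | github.com/matheusfonseca18/Abreviador | abreviar.py | limpar_especial
-- ===== SOURCE A (Python) =====
-- def limpar_especial(frase):
--     frase_limpa = ''
--
--     for c in frase:
--         if c.isalnum() or c.isspace():
--             frase_limpa += c
--
--     palavras = frase_limpa.split()
--     frase_normal = ' '.join(palavras)
--
--     return frase_normal.upper()
-- ===== SOURCE B (Python) =====
-- def limpar_especial(frase):
--     palavras = []
--     atual = ''
--     for c in frase:
--         if c.isalnum():
--             atual += c
--         elif c.isspace():
--             if atual:
--                 palavras.append(atual)
--                 atual = ''
--         # any other character is dropped entirely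
--     if atual:
--         palavras.append(atual)
--     return ' '.join(palavras).upper()
-- ===== Notes on version B (the rewrite author's own statement) =====
-- stated objective: alternative
-- what changed: Replaces A's three-stage pipeline (filter to an intermediate string, split it, rejoin) with a single pass over the characters that builds the word list directly with a current-word accumulator.
import Mathlib
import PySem

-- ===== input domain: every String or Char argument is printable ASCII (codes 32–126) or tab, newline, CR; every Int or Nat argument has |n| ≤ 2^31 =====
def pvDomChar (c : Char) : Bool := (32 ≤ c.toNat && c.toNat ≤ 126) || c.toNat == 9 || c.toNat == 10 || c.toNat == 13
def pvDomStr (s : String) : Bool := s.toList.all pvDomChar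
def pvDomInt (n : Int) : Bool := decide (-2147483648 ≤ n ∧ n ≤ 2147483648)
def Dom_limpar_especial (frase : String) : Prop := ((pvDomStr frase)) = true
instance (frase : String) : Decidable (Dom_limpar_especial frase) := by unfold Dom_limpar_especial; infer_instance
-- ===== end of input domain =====

-- B replaces A's filter/split/join pipeline by one pass that builds the word list
-- directly with a current-word accumulator (objective: alternative decomposition).

-- ===== PORT A =====
-- filter to an intermediate string, then split on whitespace, join with ' ', uppercase
def limpar_especial (frase : String) : String :=
  let frase_limpa : List Char :=
    frase.toList.foldl
      (fun acc c =>
        if PySem.Chars.isalnum c || PySem.Chars.isspace c then acc ++ [c] else acc) []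
  let palavras := PySem.Chars.split₀ frase_limpa
  let frase_normal := PySem.Chars.join [' '] palavras
  String.ofList (PySem.Chars.upper frase_normal)

-- ===== PORT B =====
-- one step of B's loop: state = (finished words, current word)
def limparStep (st : List (List Char) × List Char) (c : Char) :
    List (List Char) × List Char :=
  if PySem.Chars.isalnum c then (st.1, st.2 ++ [c])
  else if PySem.Chars.isspace c then
    (if st.2.isEmpty then st else (st.1 ++ [st.2], []))
  else st

def limpar_especial_alt (frase : String) : String :=
  let st := frase.toList.foldl limparStep ([], [])
  let palavras := if st.2.isEmpty then st.1 else st.1 ++ [st.2]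
  String.ofList (PySem.Chars.upper (PySem.Chars.join [' '] palavras))

-- ===== PRECONDITION & SPEC =====
def Spec_limpar_especial (frase : String) (out : String) : Prop := out = limpar_especial_alt frase
instance (frase : String) (out : String) : Decidable (Spec_limpar_especial frase out) := by unfold Spec_limpar_especial; infer_instance

-- ===== CLAIM (what is proved, stated in full; the proofs are below) =====
def Claim_equal_limpar_especial : Prop := ∀ (frase : String), Dom_limpar_especial frase → Spec_limpar_especial frase (limpar_especial frase)

-- ===== LEMMAS AND PROOFS =====

theorem alnum_not_space (c : Char) (h : PySem.Chars.isalnum c = true) :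
    PySem.Chars.isspace c = false := by
  unfold PySem.Chars.isspace
  simp only [PySem.Chars.isalnum, PySem.Chars.isalpha, PySem.Chars.isdigit, PySem.Chars.isupper,
    PySem.Chars.islower, Bool.or_eq_true, Bool.and_eq_true, decide_eq_true_eq,
    Bool.or_eq_false_iff, Bool.and_eq_false_iff, decide_eq_false_iff_not, Char.le_def,
    UInt32.le_iff_toNat_le, Char.toNat, not_le,
    (by decide : 'A'.val.toNat = 65), (by decide : 'Z'.val.toNat = 90),
    (by decide : 'a'.val.toNat = 97), (by decide : 'z'.val.toNat = 122),
    (by decide : '0'.val.toNat = 48), (by decide : '9'.val.toNat = 57)] at *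
  omega

-- flush B's loop state into the final word list
def flushWords (st : List (List Char) × List Char) : List (List Char) :=
  if st.2.isEmpty then st.1 else st.1 ++ [st.2]

-- the core invariant: B's fold, flushed, computes split₀ of the filtered characters
theorem loop_eq_split₀go (cs : List Char) :
    ∀ (cur : List Char) (acc : List (List Char)),
    flushWords (cs.foldl limparStep (acc.reverse, cur.reverse))
      = PySem.Chars.split₀.go
          (cs.filter (fun c => PySem.Chars.isalnum c || PySem.Chars.isspace c)) cur acc := by
  induction cs with
  | nil =>
    intro cur acc
    simp only [List.foldl_nil, List.filter_nil, flushWords, PySem.Chars.split₀.go]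
    cases cur with
    | nil => simp
    | cons x xs => simp
  | cons c cs ih =>
    intro cur acc
    by_cases ha : PySem.Chars.isalnum c = true
    · have hs := alnum_not_space c ha
      simp only [List.foldl_cons, List.filter_cons, ha, hs, Bool.true_or, if_pos,
        limparStep, PySem.Chars.split₀.go]
      have : (acc.reverse, cur.reverse ++ [c]) = (acc.reverse, (c :: cur).reverse) := by simp
      rw [this, ih]
      simp
    · have ha' : PySem.Chars.isalnum c = false := by simpa using ha
      by_cases hs : PySem.Chars.isspace c = true
      · simp only [List.foldl_cons, List.filter_cons, ha', hs, Bool.false_or, ite_true,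
          limparStep, Bool.false_eq_true, ite_false, PySem.Chars.split₀.go]
        cases cur with
        | nil =>
          have := ih [] acc
          simp only [List.reverse_nil] at this ⊢
          simpa using this
        | cons x xs =>
          have hne : ((x :: xs).reverse).isEmpty = false := by simp
          simp only [hne, Bool.false_eq_true, ite_false]
          have : (acc.reverse ++ [(x :: xs).reverse], ([] : List Char))
              = (((x :: xs).reverse :: acc).reverse, ([] : List Char).reverse) := by simp
          rw [this, ih]
          simp
      · have hs' : PySem.Chars.isspace c = false := by simpa using hs
        simp only [List.foldl_cons, List.filter_cons, ha', hs', Bool.false_or,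
          Bool.false_eq_true, if_neg, ite_false, limparStep]
        exact ih cur acc

theorem limpar_words_eq (cs : List Char) :
    (if (cs.foldl limparStep ([], [])).2.isEmpty then (cs.foldl limparStep ([], [])).1
     else (cs.foldl limparStep ([], [])).1 ++ [(cs.foldl limparStep ([], [])).2])
      = PySem.Chars.split₀
          (cs.filter (fun c => PySem.Chars.isalnum c || PySem.Chars.isspace c)) := by
  have := loop_eq_split₀go cs [] []
  simpa [flushWords, PySem.Chars.split₀] using this

-- ===== VERDICT (by name: the statement is the Claim_ definition above) =====
theorem limpar_especial_spec : Claim_equal_limpar_especial := by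
  intro frase _
  unfold Spec_limpar_especial limpar_especial limpar_especial_alt
  rw [PySem.List.foldl_append_if (fun c => PySem.Chars.isalnum c || PySem.Chars.isspace c)
    (fun c => c) frase.toList []]
  dsimp only
  rw [limpar_words_eq frase.toList]
  simp
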